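-- pv_equiv track=rewrite | github.com/JurajMa/transcription | transcription/service.py | _dedup_overlap
-- ===== SOURCE A (Python) =====
-- def _dedup_overlap(prev: str, curr: str, tail_chars: int = 200, head_chars: int = 500) -> str:
--     """Trim duplicated overlap text between two consecutive chunks."""
--     if not prev:
--         return curr
--     prev_tail = prev[-tail_chars:]
--     curr_head = curr[:head_chars]
--     upto = min(len(prev_tail), len(curr_head))
--     for size in range(upto, 0, -1):
--         if prev_tail[-size:] == curr_head[:size]:
--             return curr[size:]
--     return curr
-- ===== SOURCE B (Python) =====
-- def _dedup_overlap(prev: str, curr: str, tail_chars: int = 200, head_chars: int = 500) -> str: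
--     """Trim duplicated overlap text between two consecutive chunks.
--
--     Instead of re-slicing and comparing at every candidate size, scan only the
--     positions in the tail where the head's first character occurs (C-level
--     str.find jumps between them) and test each candidate with startswith.
--     """
--     if not prev:
--         return curr
--     tail = prev[-tail_chars:]
--     head = curr[:head_chars]
--     limit = min(len(tail), len(head))
--     if limit == 0:
--         return curr
--     return _scan(tail, head, curr, head[0], len(tail) - limit)
--
--
-- def _scan(tail, head, curr, first, pos):
--     while pos < len(tail):
--         if head.startswith(tail[pos:]):
--             return curr[len(tail) - pos:]
--         nxt = tail.find(first, pos + 1)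
--         if nxt == -1:
--             return curr
--         pos = nxt
--     return curr
-- ===== Notes on version B (the rewrite author's own statement) =====
-- stated objective: faster
-- what changed: Instead of re-slicing and comparing the two strings at every candidate overlap size, B scans only the tail positions where the head's first character occurs (jumping between them with str.find) and tests each candidate once with startswith, so non-candidate sizes are never materialised as slices.
import Mathlib
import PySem

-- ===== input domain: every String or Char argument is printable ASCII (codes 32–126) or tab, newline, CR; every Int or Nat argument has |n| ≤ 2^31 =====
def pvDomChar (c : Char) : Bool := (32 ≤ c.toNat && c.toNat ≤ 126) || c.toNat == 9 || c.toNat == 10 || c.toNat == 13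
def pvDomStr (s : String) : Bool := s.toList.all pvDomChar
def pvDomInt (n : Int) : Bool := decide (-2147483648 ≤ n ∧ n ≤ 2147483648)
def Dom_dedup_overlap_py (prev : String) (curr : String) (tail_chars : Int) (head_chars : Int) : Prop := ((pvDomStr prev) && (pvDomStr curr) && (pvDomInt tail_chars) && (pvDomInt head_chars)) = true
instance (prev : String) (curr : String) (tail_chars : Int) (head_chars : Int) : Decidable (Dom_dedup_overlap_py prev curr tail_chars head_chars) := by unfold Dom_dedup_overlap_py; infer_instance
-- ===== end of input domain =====

-- B replaces A's try-every-size loop by probing only the tail positions where the head's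
-- first character occurs (str.find jumps between them); objective: faster (measured).
-- Both programs are pure (no argument is mutated).

-- ===== PORT A =====
-- 'for size in range(upto, 0, -1): if prev_tail[-size:] == curr_head[:size]: return curr[size:]'
def pvLoopA (prev_tail curr_head curr : List Char) : List Int → List Char
  | [] => curr
  | size :: rest =>
    if PySem.List.slice prev_tail (some (-size)) none = PySem.List.slice curr_head none (some size)
    then PySem.List.slice curr (some size) none
    else pvLoopA prev_tail curr_head curr rest

def pvBodyA (prev_tail curr_head : List Char) (curr : String) : String :=
  String.ofList (pvLoopA prev_tail curr_head curr.toList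
    (PySem.List.pyRange (min (prev_tail.length : Int) (curr_head.length : Int)) 0 (-1)))

def dedup_overlap_py (prev : String) (curr : String) (tail_chars : Int) (head_chars : Int) : String :=
  if prev = "" then curr
  else pvBodyA (PySem.List.slice prev.toList (some (-tail_chars)) none)
               (PySem.List.slice curr.toList none (some head_chars)) curr

-- ===== PORT B =====
-- the 'while pos < len(tail)' loop of _scan; Python's pos is a nonnegative int throughout,
-- so it is carried as a Nat; tail[pos:] is tail.drop pos and curr[len(tail)-pos:] is
-- curr.drop (tail.length - pos) (both indices nonnegative, exact by PySem.List.slice_from_natCast)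
def pvScan (tail head curr : List Char) (first : Char) (pos : Nat) : List Char :=
  if h : pos < tail.length then
    if PySem.Chars.startswith head (tail.drop pos) then curr.drop (tail.length - pos)
    else  -- 'nxt = tail.find(first, pos + 1)' inlined into the test and the recursive call
      if hn : PySem.Chars.findFrom tail [first] ((pos + 1 : Nat) : Int) none = -1 then curr
      else pvScan tail head curr first (PySem.Chars.findFrom tail [first] ((pos + 1 : Nat) : Int) none).toNat
  else curr
termination_by tail.length - pos
decreasing_by
  have h1 := (PySem.Chars.findFrom_natCast_spec tail [first] (pos + 1) (by omega) hn).1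
  omega

def pvBodyB (tail head : List Char) (curr : String) : String :=
  if min tail.length head.length = 0 then curr
  else
    match head with
    | [] => curr  -- unreachable: min ≠ 0 forces head ≠ []; totality guard for head[0]
    | f :: _ => String.ofList (pvScan tail head curr.toList f
                  (tail.length - min tail.length head.length))

def dedup_overlap_py_alt (prev : String) (curr : String) (tail_chars : Int) (head_chars : Int) : String :=
  if prev = "" then curr
  else pvBodyB (PySem.List.slice prev.toList (some (-tail_chars)) none)
               (PySem.List.slice curr.toList none (some head_chars)) curr

-- ===== PRECONDITION & SPEC =====
def Spec_dedup_overlap_py (prev : String) (curr : String) (tail_chars : Int) (head_chars : Int) (out : String) : Prop := out = dedup_overlap_py_alt prev curr tail_chars head_chars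
instance (prev : String) (curr : String) (tail_chars : Int) (head_chars : Int) (out : String) : Decidable (Spec_dedup_overlap_py prev curr tail_chars head_chars out) := by unfold Spec_dedup_overlap_py; infer_instance

-- ===== CLAIM (what is proved, stated in full; the proofs are below) =====
def Claim_equal_dedup_overlap_py : Prop := ∀ (prev : String) (curr : String) (tail_chars : Int) (head_chars : Int), Dom_dedup_overlap_py prev curr tail_chars head_chars → Spec_dedup_overlap_py prev curr tail_chars head_chars (dedup_overlap_py prev curr tail_chars head_chars)

-- ===== LEMMAS AND PROOFS =====

lemma pv_singleton_prefix (f : Char) (l : List Char) : [f] <+: l ↔ l.head? = some f := by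
  cases l with
  | nil => simp
  | cons a t => simp [List.cons_prefix_cons, eq_comm]

lemma pv_head?_take (l : List Char) (n : Nat) (h : n ≠ 0) : (l.take n).head? = l.head? := by
  cases l <;> cases n <;> simp_all

-- a successful size-s check forces the head's first character at tail position n - s
lemma pv_check_head (T H : List Char) (f : Char) (hf : H.head? = some f) (s : Nat)
    (hs1 : 1 ≤ s) (hsT : s ≤ T.length) (hEq : T.drop (T.length - s) = H.take s) :
    T[T.length - s]? = some f := by
  have := congrArg List.head? hEq
  rwa [List.head?_drop, pv_head?_take H s (by omega), hf] at this

-- peel A's loop past sizes whose check fails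
lemma pv_loopA_skip (T H C : List Char) (a b : Nat) (hab : a ≤ b)
    (hfail : ∀ s' : Nat, a < s' → s' ≤ b → T.drop (T.length - s') ≠ H.take s') :
    pvLoopA T H C (PySem.List.pyRange (b : Int) 0 (-1)) =
      pvLoopA T H C (PySem.List.pyRange (a : Int) 0 (-1)) := by
  induction b with
  | zero => obtain rfl : a = 0 := by omega
            rfl
  | succ k ih =>
    rcases Nat.lt_or_ge a (k + 1) with hlt | hge
    · have hpeel : PySem.List.pyRange ((k + 1 : Nat) : Int) 0 (-1) =
          ((k + 1 : Nat) : Int) :: PySem.List.pyRange ((k : Nat) : Int) 0 (-1) := by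
        rw [PySem.List.pyRange_neg_one_cons (by positivity)]
        norm_num
      rw [hpeel]
      have hne : ¬ (PySem.List.slice T (some (-((k + 1 : Nat) : Int))) none =
          PySem.List.slice H none (some ((k + 1 : Nat) : Int))) := by
        rw [PySem.List.slice_from_neg_natCast T (k + 1) (by omega),
            PySem.List.slice_to_natCast]
        exact hfail (k + 1) hlt le_rfl
      rw [pvLoopA, if_neg hne]
      exact ih (by omega) (fun s' h1 h2 => hfail s' h1 (by omega))
    · obtain rfl : a = k + 1 := by omega
      rfl

-- the crux: A's decreasing-size loop from size s equals B's position scan from pos = n - s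
lemma pv_scan_eq (T H C : List Char) (f : Char) (hf : H.head? = some f)
    (s : Nat) :  s ≤ T.length → s ≤ H.length →
    pvLoopA T H C (PySem.List.pyRange (s : Int) 0 (-1)) = pvScan T H C f (T.length - s) := by
  induction s using Nat.strong_induction_on with
  | _ s IH =>
  intro hsT hsH
  match s with
  | 0 =>
    rw [PySem.List.pyRange_neg_one_eq_nil (by norm_num), pvScan]
    simp [pvLoopA]
  | (m + 1) =>
  have hn1 : m + 1 ≤ T.length := hsT
  have hpeel : PySem.List.pyRange ((m + 1 : Nat) : Int) 0 (-1) =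
      ((m + 1 : Nat) : Int) :: PySem.List.pyRange ((m : Nat) : Int) 0 (-1) := by
    rw [PySem.List.pyRange_neg_one_cons (by positivity)]
    norm_num
  rw [hpeel, pvLoopA, PySem.List.slice_from_neg_natCast T (m + 1) (by omega),
      PySem.List.slice_to_natCast, pvScan, dif_pos (show T.length - (m + 1) < T.length by omega)]
  have hcond : (PySem.Chars.startswith H (T.drop (T.length - (m + 1))) = true) ↔
      (T.drop (T.length - (m + 1)) = H.take (m + 1)) := by
    rw [PySem.Chars.startswith_iff, List.prefix_iff_eq_take, List.length_drop,
        show T.length - (T.length - (m + 1)) = m + 1 by omega]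
  by_cases hm : T.drop (T.length - (m + 1)) = H.take (m + 1)
  · rw [if_pos hm, if_pos (hcond.mpr hm), PySem.List.slice_from_natCast,
        show T.length - (T.length - (m + 1)) = m + 1 by omega]
  · rw [if_neg hm, if_neg (fun hb => hm (hcond.mp hb))]
    have hple : T.length - (m + 1) + 1 ≤ T.length := by omega
    by_cases hn : PySem.Chars.findFrom T [f] ((T.length - (m + 1) + 1 : Nat) : Int) none = -1
    · rw [dif_pos hn]
      have hnotin : ¬ f ∈ T.drop (T.length - (m + 1) + 1) := by
        have := (PySem.Chars.findFrom_natCast_eq_neg_one_iff T [f] _ hple).mp hn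
        rwa [List.singleton_infix_iff] at this
      rw [pv_loopA_skip T H C 0 m (by omega) ?_, PySem.List.pyRange_neg_one_eq_nil (by norm_num)]
      · rfl
      · intro s' h1 h2 hEq
        have hgf := pv_check_head T H f hf s' h1 (by omega) hEq
        apply hnotin
        have hidx : T.length - (m + 1) + 1 ≤ T.length - s' := by omega
        refine List.mem_iff_getElem?.mpr ⟨T.length - s' - (T.length - (m + 1) + 1), ?_⟩
        rw [List.getElem?_drop,
            show T.length - (m + 1) + 1 + (T.length - s' - (T.length - (m + 1) + 1)) =
              T.length - s' by omega]
        exact hgf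
    · rw [dif_neg hn]
      obtain ⟨hge, hpref, hmin⟩ := PySem.Chars.findFrom_natCast_spec T [f] _ hple hn
      set p := (PySem.Chars.findFrom T [f] ((T.length - (m + 1) + 1 : Nat) : Int) none).toNat
        with hp
      have hppos : T.length - (m + 1) + 1 ≤ p := by omega
      have hplt : p < T.length := by
        rw [pv_singleton_prefix, List.head?_drop] at hpref
        by_contra hcon
        rw [List.getElem?_eq_none (by omega)] at hpref
        cases hpref
      have hfail2 : ∀ s' : Nat, T.length - p < s' → s' ≤ m →
          T.drop (T.length - s') ≠ H.take s' := by
        intro s' h1 h2 hEq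
        have hgf := pv_check_head T H f hf s' (by omega) (by omega) hEq
        exact hmin (T.length - s') (by omega) (by omega)
          ((pv_singleton_prefix f _).mpr (by rwa [List.head?_drop]))
      rw [pv_loopA_skip T H C (T.length - p) m (by omega) hfail2,
          IH (T.length - p) (by omega) (by omega) (by omega),
          show T.length - (T.length - p) = p by omega]

lemma pv_body_eq (T H : List Char) (curr : String) : pvBodyA T H curr = pvBodyB T H curr := by
  unfold pvBodyA pvBodyB
  rw [show (min (T.length : Int) (H.length : Int)) = ((min T.length H.length : Nat) : Int) from
    (Nat.cast_min ..).symm]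
  rcases hmin : min T.length H.length with _ | l
  · rw [if_pos rfl, PySem.List.pyRange_neg_one_eq_nil (by norm_num)]
    simp [pvLoopA]
  · have hT : l + 1 ≤ T.length := by have := Nat.min_le_left T.length H.length; omega
    have hH : l + 1 ≤ H.length := by have := Nat.min_le_right T.length H.length; omega
    rw [if_neg (by omega)]
    obtain ⟨f, hs, rfl⟩ : ∃ f hs, H = f :: hs := by
      cases H with
      | nil => simp at hH
      | cons f hs => exact ⟨f, hs, rfl⟩
    exact congrArg String.ofList
      (pv_scan_eq T (f :: hs) curr.toList f rfl (l + 1) hT hH)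

-- ===== VERDICT (by name: the statement is the Claim_ definition above) =====
theorem dedup_overlap_py_spec : Claim_equal_dedup_overlap_py := by
  intro prev curr tail_chars head_chars _
  unfold Spec_dedup_overlap_py dedup_overlap_py dedup_overlap_py_alt
  by_cases hp : prev = ""
  · simp [hp]
  · simp only [if_neg hp]
    exact pv_body_eq _ _ _
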